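-- pv_equiv track=rewrite | github.com/DragunWF/Competitive-Programming | CodeWars/python/6_kyu/ping_pong.py | ping_pong
-- ===== SOURCE A (Python) =====
-- def ping_pong(sounds: str) -> str:
--     sound_list = sounds.split("-")
--     mr_ping_score = 0
--     mr_pong_score = 0
--     first_serve = None
--     last_sound = None
--     last_bad_shot = None
--
--     for sound in sound_list:
--         if sound == "ping" or sound == "pong":
--             if last_sound is None:
--                 first_serve = sound
--             last_sound = sound
--         elif last_sound:
--             last_bad_shot = last_sound
--             if last_bad_shot != "ping" and first_serve == "ping":
--                 mr_ping_score += 1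
--             elif last_bad_shot != "pong" and first_serve == "pong":
--                 mr_pong_score += 1
--             last_sound, first_serve = None, None
--
--     if mr_ping_score == mr_pong_score:
--         return "ping" if last_bad_shot == "pong" else "pong"
--     return "ping" if mr_ping_score > mr_pong_score else "pong"
-- ===== SOURCE B (Python) =====
-- def ping_pong(sounds: str) -> str:
--     tokens = sounds.split("-")
--     # Pass 1: collect closed rallies (maximal runs of ping/pong tokens ended
--     # by a delimiter token); an unterminated trailing run is dropped.
--     rallies = []
--     run = []
--     for t in tokens:
--         if t == "ping" or t == "pong":
--             run.append(t)
--         else: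
--             if run:
--                 rallies.append(run)
--                 run = []
--     # Pass 2: score each rally from its first and last shot.
--     ping = 0
--     pong = 0
--     sentinel = None
--     for r in rallies:
--         first, last = r[0], r[-1]
--         if first == "ping" and last == "pong":
--             ping += 1
--         elif first == "pong" and last == "ping":
--             pong += 1
--         sentinel = last
--     if ping == pong:
--         return "ping" if sentinel == "pong" else "pong"
--     return "ping" if ping > pong else "pong"
-- ===== Notes on version B (the rewrite author's own statement) =====
-- stated objective: alternative
-- what changed: B replaces A's single fold carrying first-serve/last-sound/last-bad-shot option state with a two-pass decomposition: first group tokens into closed rallies (runs of ping/pong ended by a delimiter), then score each rally from its first and last element.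
import Mathlib
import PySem

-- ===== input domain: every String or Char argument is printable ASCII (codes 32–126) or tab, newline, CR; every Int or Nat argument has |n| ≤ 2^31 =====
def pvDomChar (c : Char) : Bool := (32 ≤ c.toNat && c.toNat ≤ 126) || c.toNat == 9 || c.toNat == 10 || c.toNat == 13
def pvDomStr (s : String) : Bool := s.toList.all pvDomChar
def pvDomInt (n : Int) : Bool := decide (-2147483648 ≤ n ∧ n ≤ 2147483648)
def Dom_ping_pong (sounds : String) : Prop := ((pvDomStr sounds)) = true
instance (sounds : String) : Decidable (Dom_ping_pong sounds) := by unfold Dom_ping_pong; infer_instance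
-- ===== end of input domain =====

-- B re-decomposes A's stateful single fold into two passes (collect closed rallies, then
-- score each from its first/last shot); same O(n) cost, objective: alternative.

-- ===== PORT A =====
-- state: (mr_ping_score, mr_pong_score, first_serve, last_sound, last_bad_shot)
def pingPongStep (st : Int × Int × Option String × Option String × Option String)
    (sound : String) : Int × Int × Option String × Option String × Option String :=
  match st with
  | (pi, po, fs, ls, lb) =>
    if sound = "ping" ∨ sound = "pong" then
      (pi, po, if ls = none then some sound else fs, some sound, lb)
    else
      match ls with
      | some s =>
        -- Python 'elif last_sound:' truthiness: a string is truthy iff nonempty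
        if s ≠ "" then
          if s ≠ "ping" ∧ fs = some "ping" then (pi + 1, po, none, none, some s)
          else if s ≠ "pong" ∧ fs = some "pong" then (pi, po + 1, none, none, some s)
          else (pi, po, none, none, some s)
        else (pi, po, fs, ls, lb)
      | none => (pi, po, fs, ls, lb)

def ping_pong (sounds : String) : String :=
  let st := ((PySem.Str.split? sounds "-").getD []).foldl pingPongStep ((0:Int), (0:Int), (none:Option String), (none:Option String), (none:Option String))
  if st.1 = st.2.1 then (if st.2.2.2.2 = some "pong" then "ping" else "pong")
  else if st.1 > st.2.1 then "ping" else "pong"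

-- ===== PORT B =====
-- pass 1: closed rallies (runs of ping/pong tokens ended by a delimiter; trailing run dropped)
def collectRallies (tokens : List String) (run : List String) : List (List String) :=
  match tokens with
  | [] => []
  | t :: ts =>
    if t = "ping" ∨ t = "pong" then collectRallies ts (run ++ [t])
    else if run ≠ [] then run :: collectRallies ts []
    else collectRallies ts []

-- pass 2 step: state (ping, pong, sentinel)
def scoreStep (st : Int × Int × Option String) (r : List String) : Int × Int × Option String :=
  match st, r with
  | st, [] => st
  | (pi, po, _), f :: rest =>
    let last := rest.getLastD f
    if f = "ping" ∧ last = "pong" then (pi + 1, po, some last)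
    else if f = "pong" ∧ last = "ping" then (pi, po + 1, some last)
    else (pi, po, some last)

def ping_pong_alt (sounds : String) : String :=
  let rallies := collectRallies ((PySem.Str.split? sounds "-").getD []) []
  let st := rallies.foldl scoreStep ((0:Int), (0:Int), (none:Option String))
  if st.1 = st.2.1 then (if st.2.2 = some "pong" then "ping" else "pong")
  else if st.1 > st.2.1 then "ping" else "pong"

-- ===== PRECONDITION & SPEC =====
def Spec_ping_pong (sounds : String) (out : String) : Prop := out = ping_pong_alt sounds
instance (sounds : String) (out : String) : Decidable (Spec_ping_pong sounds out) := by unfold Spec_ping_pong; infer_instance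

-- ===== CLAIM (what is proved, stated in full; the proofs are below) =====
def Claim_equal_ping_pong : Prop := ∀ (sounds : String), Dom_ping_pong sounds → Spec_ping_pong sounds (ping_pong sounds)

-- ===== LEMMAS AND PROOFS =====

lemma getLast?_cons' (f : String) (rest : List String) :
    (f :: rest).getLast? = some (rest.getLastD f) := by
  induction rest generalizing f with
  | nil => rfl
  | cons a l ih => rw [List.getLast?_cons_cons, ih, List.getLastD_cons]

lemma getLastD_mem (f : String) (rest : List String) : rest.getLastD f ∈ f :: rest :=
  List.mem_of_getLast? (getLast?_cons' f rest)

lemma key (ts : List String) : ∀ (run : List String) (pi po : Int) (lb : Option String),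
    (∀ x ∈ run, x = "ping" ∨ x = "pong") →
    (let st := ts.foldl pingPongStep (pi, po, run.head?, run.getLast?, lb)
     (st.1, st.2.1, st.2.2.2.2)) = (collectRallies ts run).foldl scoreStep (pi, po, lb) := by
  induction ts with
  | nil => intro run pi po lb _; simp [collectRallies]
  | cons t ts ih =>
    intro run pi po lb hrun
    simp only [List.foldl_cons, collectRallies]
    by_cases hp : t = "ping" ∨ t = "pong"
    · -- t extends the run
      have hstep : pingPongStep (pi, po, run.head?, run.getLast?, lb) t
          = (pi, po, (run ++ [t]).head?, (run ++ [t]).getLast?, lb) := by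
        cases run with
        | nil => simp [pingPongStep, hp]
        | cons f r => simp [pingPongStep, hp, getLast?_cons']
      rw [hstep, if_pos hp]
      exact ih (run ++ [t]) pi po lb (by
        intro x hx; rcases List.mem_append.mp hx with h | h
        · exact hrun x h
        · simp_all)
    · -- t is a delimiter
      cases run with
      | nil =>
        simp only [List.head?_nil, List.getLast?_nil]
        have hstep : pingPongStep (pi, po, (none : Option String), (none : Option String), lb) t
            = (pi, po, none, none, lb) := by
          simp [pingPongStep, hp]
        rw [hstep, if_neg hp]
        simpa using ih [] pi po lb (by simp)
      | cons f rest =>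
        have hf : f = "ping" ∨ f = "pong" := hrun f (by simp)
        have hl : rest.getLastD f = "ping" ∨ rest.getLastD f = "pong" :=
          hrun _ (getLastD_mem f rest)
        rw [if_neg hp, if_pos (by simp : (f :: rest) ≠ []), getLast?_cons']
        set l := rest.getLastD f with hldef
        have hne : l ≠ "" := by rcases hl with h | h <;> simp [h]
        have hA : pingPongStep (pi, po, (f :: rest).head?, some l, lb) t
            = (if l ≠ "ping" ∧ f = "ping" then (pi + 1, po, none, none, some l)
               else if l ≠ "pong" ∧ f = "pong" then (pi, po + 1, none, none, some l)
               else (pi, po, none, none, some l)) := by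
          simp [pingPongStep, hp, hne]
        have hB : scoreStep (pi, po, lb) (f :: rest)
            = (if f = "ping" ∧ l = "pong" then (pi + 1, po, some l)
               else if f = "pong" ∧ l = "ping" then (pi, po + 1, some l)
               else (pi, po, some l)) := rfl
        have ihz : ∀ pi' po' : Int,
            (let st := ts.foldl pingPongStep (pi', po', (none : Option String),
                (none : Option String), some l)
             (st.1, st.2.1, st.2.2.2.2))
              = (collectRallies ts []).foldl scoreStep (pi', po', some l) := by
          intro pi' po'
          simpa using ih [] pi' po' (some l) (by simp)
        rw [hA, List.foldl_cons, hB]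
        clear_value l
        rcases hf with rfl | rfl <;> rcases hl with rfl | rfl <;>
          · simp only [ne_eq, String.reduceEq, not_true_eq_false, not_false_eq_true,
              and_false, and_true, if_true, if_false]
            exact ihz _ _

lemma finish_eq (stA : Int × Int × Option String × Option String × Option String)
    (stB : Int × Int × Option String)
    (h : (stA.1, stA.2.1, stA.2.2.2.2) = stB) :
    (if stA.1 = stA.2.1 then (if stA.2.2.2.2 = some "pong" then "ping" else "pong")
     else if stA.1 > stA.2.1 then "ping" else "pong")
      = (if stB.1 = stB.2.1 then (if stB.2.2 = some "pong" then "ping" else "pong")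
         else if stB.1 > stB.2.1 then "ping" else "pong") := by
  obtain ⟨a, b, c, d, e⟩ := stA
  obtain ⟨x, y, z⟩ := stB
  simp only [Prod.mk.injEq] at h
  obtain ⟨h1, h2, h3⟩ := h
  subst h1; subst h2; subst h3
  rfl

-- ===== VERDICT (by name: the statement is the Claim_ definition above) =====
theorem ping_pong_spec : Claim_equal_ping_pong := by
  intro sounds _
  unfold Spec_ping_pong ping_pong ping_pong_alt
  exact finish_eq _ _
    (by simpa using key ((PySem.Str.split? sounds "-").getD []) [] 0 0 none (by simp))
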